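-- pv_equiv track=rewrite | github.com/uh004/programmers | lv1/부족한 금액 계산하기.py | solution
-- ===== SOURCE A (Python) =====
-- def solution(price, money, count):
--     answer = 0 # 이용료 N배의 값
--
--     for i in range(1,count+1):
--         answer += price * i # count 할때마다 가격이 게속 더해져서 저장
--
--     if money - answer < 0: # 조건이 금액이 부족하지 않으면 이니까 뺏을때 마이너스가 되면 모자른다
--         return abs(money - answer) # 절대값 붙혀서
--     else:
--         return 0 # 만약에 0보다 크면 금액이 부족하지 않음 그래서 0반환
-- ===== SOURCE B (Python) =====
-- def solution(price, money, count):
--     total = price * count * (count + 1) // 2 if count > 0 else 0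
--     return max(0, total - money)
-- ===== Notes on version B (the rewrite author's own statement) =====
-- stated objective: faster
-- what changed: Replaces the O(count) accumulation loop with the closed-form arithmetic-series sum price*count*(count+1)//2 and a max(0, ...) instead of the branch on abs.
import Mathlib
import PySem

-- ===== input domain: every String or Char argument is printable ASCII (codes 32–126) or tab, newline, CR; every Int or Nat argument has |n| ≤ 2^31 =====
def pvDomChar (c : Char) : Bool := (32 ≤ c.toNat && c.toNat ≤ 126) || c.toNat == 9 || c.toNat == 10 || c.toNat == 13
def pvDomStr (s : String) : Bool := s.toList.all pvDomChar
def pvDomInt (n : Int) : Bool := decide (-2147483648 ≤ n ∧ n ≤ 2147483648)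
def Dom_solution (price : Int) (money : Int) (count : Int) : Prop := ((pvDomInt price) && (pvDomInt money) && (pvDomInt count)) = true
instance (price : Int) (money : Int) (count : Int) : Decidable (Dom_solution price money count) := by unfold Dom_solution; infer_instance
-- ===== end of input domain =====

-- B replaces A's O(count) accumulation loop with the closed-form series sum price*count*(count+1)//2 (objective: faster).

-- ===== PORT A =====
def solution (price : Int) (money : Int) (count : Int) : Int :=
  let answer := (PySem.List.pyRange 1 (count + 1) 1).foldl (fun acc i => acc + price * i) 0
  if money - answer < 0 then |money - answer| else 0

-- ===== PORT B =====
def solution_alt (price : Int) (money : Int) (count : Int) : Int :=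
  let total := if 0 < count then PySem.Int.floordiv (price * count * (count + 1)) 2 else 0
  max 0 (total - money)

-- ===== PRECONDITION & SPEC =====
def Spec_solution (price : Int) (money : Int) (count : Int) (out : Int) : Prop := out = solution_alt price money count
instance (price : Int) (money : Int) (count : Int) (out : Int) : Decidable (Spec_solution price money count out) := by unfold Spec_solution; infer_instance

-- ===== CLAIM (what is proved, stated in full; the proofs are below) =====
def Claim_equal_solution : Prop := ∀ (price : Int) (money : Int) (count : Int), Dom_solution price money count → Spec_solution price money count (solution price money count)

-- ===== LEMMAS AND PROOFS =====

-- triangular numbers as an Int-valued recursion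
def pvTri : Nat → Int
  | 0 => 0
  | n + 1 => pvTri n + (n + 1)

theorem pvTri_two_mul (n : Nat) : 2 * pvTri n = (n : Int) * (n + 1) := by
  induction n with
  | zero => simp [pvTri]
  | succ k ih => simp [pvTri]; linarith

theorem pv_foldl_tri (price : Int) (n : Nat) (acc : Int) :
    (PySem.List.pyRange 1 ((n : Int) + 1) 1).foldl (fun a i => a + price * i) acc
      = acc + price * pvTri n := by
  induction n generalizing acc with
  | zero => rw [PySem.List.pyRange_one_eq_nil (by omega)]; simp [pvTri]
  | succ k ih =>
      rw [PySem.List.pyRange_one_succ_right (by push_cast; omega)]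
      simp only [List.foldl_append, List.foldl_cons, List.foldl_nil]
      have hc : ((k + 1 : Nat) : Int) = (k : Int) + 1 := by push_cast; ring
      rw [hc, ih]
      simp [pvTri]; ring

theorem pv_answer_eq (price count : Int) :
    (PySem.List.pyRange 1 (count + 1) 1).foldl (fun a i => a + price * i) 0
      = (if 0 < count then PySem.Int.floordiv (price * count * (count + 1)) 2 else 0) := by
  by_cases h : 0 < count
  · rw [if_pos h]
    obtain ⟨n, rfl⟩ : ∃ n : Nat, count = (n : Int) := ⟨count.toNat, by omega⟩
    rw [pv_foldl_tri]
    have h2 : price * (n : Int) * ((n : Int) + 1) = 2 * (price * pvTri n) := by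
      have := pvTri_two_mul n; linear_combination (-price) * this
    rw [h2, PySem.Int.floordiv_eq_ediv_of_pos (by norm_num),
        Int.mul_ediv_cancel_left _ (by norm_num)]
    ring
  · rw [if_neg h, PySem.List.pyRange_one_eq_nil (by omega)]; simp

theorem solution_spec : Claim_equal_solution := by
  intro price money count _
  unfold Spec_solution solution solution_alt
  simp only
  rw [pv_answer_eq]
  set t := (if 0 < count then PySem.Int.floordiv (price * count * (count + 1)) 2 else 0) with ht
  split_ifs with h
  · rw [abs_of_neg h]; omega
  · omega
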